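-- pv_equiv track=rewrite | github.com/RaduTek/YTMusicDL | src/ytmusicdl/template.py | check_output_template
-- ===== SOURCE A (Python) =====
-- def check_output_template(templ: str):
--     # Check the output template for any errors:
--     if not templ.endswith(".{ext}"):
--         # log.error("Template string must end with '.{ext}'!")
--         return False
--     if templ.count("{") != templ.count("}"):
--         # Number of opened brackets is not equal to number of closed brackets
--         return False
--     i = 0
--     while i < len(templ):
--         if templ[i] == "{":
--             open_pos = i  # Position in string where bracket was open
--             close_pos = templ.find("}", i + 1)  # Position where bracket is closed
--             if close_pos == -1 or open_pos == close_pos - 1: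
--                 # Bracket is not closed or there is nothing between the brackets
--                 return False
--             keys = templ[open_pos + 1 : close_pos]
--             if "{" in keys:
--                 # Another bracket is opened inside the pair
--                 return False
--             i = close_pos
--         i += 1
--     return True
-- ===== SOURCE B (Python) =====
-- def check_output_template(templ: str):
--     if not templ.endswith(".{ext}"):
--         return False
--     if templ.count("{") != templ.count("}"):
--         return False
--     open_b = False
--     content = 0
--     for ch in templ:
--         if ch == "{":
--             if open_b:
--                 return False
--             open_b = True
--             content = 0
--         elif ch == "}":
--             if not open_b:
--                 return False
--             if content == 0:
--                 return False
--             open_b = False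
--         elif open_b:
--             content += 1
--     return not open_b
-- ===== Notes on version B (the rewrite author's own statement) =====
-- stated objective: idiomatic
-- what changed: Replaced the while/str.find scan that jumps between bracket positions by a single left-to-right character pass maintaining an open-bracket flag and a content counter.
import Mathlib
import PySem

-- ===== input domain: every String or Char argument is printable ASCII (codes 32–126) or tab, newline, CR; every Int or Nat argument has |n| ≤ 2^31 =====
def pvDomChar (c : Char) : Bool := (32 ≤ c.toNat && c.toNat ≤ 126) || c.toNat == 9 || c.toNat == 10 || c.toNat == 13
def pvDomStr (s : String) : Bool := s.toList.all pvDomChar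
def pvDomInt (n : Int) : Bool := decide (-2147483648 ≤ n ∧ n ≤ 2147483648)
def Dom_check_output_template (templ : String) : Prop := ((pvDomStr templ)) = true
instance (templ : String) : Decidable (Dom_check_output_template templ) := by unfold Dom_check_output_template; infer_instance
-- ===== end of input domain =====

-- B replaces A's while/str.find bracket scan by a single left-to-right pass with an
-- open-bracket flag and a content counter (same O(n)-ish cost, plainer control flow).


-- ===== PORT A =====
-- templ.find("}", i+1) relative to the current suffix: index of the first '}' in t, or none.
def pvFindClose : List Char → Option Nat
  | [] => none
  | c :: t => if c = '}' then some 0 else (pvFindClose t).map (· + 1)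

-- A's while loop, with the absolute index i replaced by the suffix templ[i:] it points at:
-- '{' at i, close_pos = -1 ↔ none; open_pos = close_pos - 1 ↔ k = 0; keys = t.take k; i = close_pos; i += 1.
def pvLoopA : List Char → Bool
  | [] => true
  | c :: t =>
    if c = '{' then
      match pvFindClose t with
      | none => false
      | some k =>
        if k = 0 then false
        else if '{' ∈ t.take k then false
        else pvLoopA (t.drop (k + 1))
    else pvLoopA t
termination_by l => l.length
decreasing_by
  · simp only [List.length_drop, List.length_cons]; omega
  · simp only [List.length_cons]; omega

def check_output_template (templ : String) : Bool :=
  if !(PySem.Str.endswith templ ".{ext}") then false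
  else if PySem.Str.count templ "{" ≠ PySem.Str.count templ "}" then false
  else pvLoopA templ.toList

-- ===== PORT B =====
-- Source B's for-loop state: op = open_b, n = content.
def pvLoopB : List Char → Bool → Nat → Bool
  | [], op, _ => !op
  | c :: t, op, n =>
    if c = '{' then (if op then false else pvLoopB t true 0)
    else if c = '}' then
      (if op then (if n = 0 then false else pvLoopB t false 0) else false)
    else pvLoopB t op (if op then n + 1 else n)

def check_output_template_alt (templ : String) : Bool :=
  if !(PySem.Str.endswith templ ".{ext}") then false
  else if PySem.Str.count templ "{" ≠ PySem.Str.count templ "}" then false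
  else pvLoopB templ.toList false 0

-- ===== PRECONDITION & SPEC =====
def Spec_check_output_template (templ : String) (out : Bool) : Prop := out = check_output_template_alt templ
instance (templ : String) (out : Bool) : Decidable (Spec_check_output_template templ out) := by unfold Spec_check_output_template; infer_instance

-- ===== CLAIM (what is proved, stated in full; the proofs are below) =====
def Claim_equal_check_output_template : Prop := ∀ (templ : String), Dom_check_output_template templ → Spec_check_output_template templ (check_output_template templ)

-- ===== LEMMAS AND PROOFS =====

-- Python's str.count for a one-character needle is the character count.
theorem pv_count_go_single (c : Char) : ∀ (fuel : Nat) (l : List Char) (acc : Nat),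
    l.length ≤ fuel → PySem.Chars.count.go [c] fuel l acc = acc + l.count c := by
  intro fuel
  induction fuel with
  | zero =>
    intro l acc h
    simp only [Nat.le_zero, List.length_eq_zero_iff] at h
    simp [h, PySem.Chars.count.go]
  | succ n ih =>
    intro l acc h
    cases l with
    | nil => simp [PySem.Chars.count.go]
    | cons x t =>
      rw [PySem.Chars.count.go]
      by_cases hx : x = c
      · simp [hx, List.isPrefixOf, ih t _ (by simpa using Nat.le_of_succ_le_succ h)]
        omega
      · simp [List.isPrefixOf, hx, Ne.symm hx, ih t _ (by simpa using Nat.le_of_succ_le_succ h)]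

theorem pv_count_single (c : Char) (l : List Char) :
    PySem.Chars.count l [c] = l.count c := by
  simp [PySem.Chars.count, List.isEmpty, pv_count_go_single c l.length l 0 le_rfl]

theorem pvFindClose_none : ∀ (t : List Char), pvFindClose t = none → '}' ∉ t := by
  intro t
  induction t with
  | nil => intro _; simp
  | cons c t ih =>
    intro h
    by_cases hc : c = '}'
    · simp [pvFindClose, hc] at h
    · simp only [pvFindClose, if_neg hc, Option.map_eq_none_iff] at h
      simp [Ne.symm hc, ih h]

theorem pvFindClose_some : ∀ (t : List Char) (k : Nat), pvFindClose t = some k →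
    (t.take k).length = k ∧ '}' ∉ t.take k ∧ t = t.take k ++ '}' :: t.drop (k + 1) := by
  intro t
  induction t with
  | nil => intro k h; simp [pvFindClose] at h
  | cons c t ih =>
    intro k h
    by_cases hc : c = '}'
    · simp only [pvFindClose, if_pos hc, Option.some.injEq] at h
      subst h
      simp [hc]
    · simp only [pvFindClose, if_neg hc, Option.map_eq_some_iff] at h
      obtain ⟨k', hk', hkk⟩ := h
      subst hkk
      obtain ⟨h1, h2, h3⟩ := ih k' hk'
      refine ⟨by simpa using h1, by simp [Ne.symm hc, h2], ?_⟩
      simpa using congrArg (c :: ·) h3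

-- B skips a brace-free segment while inside a bracket, incrementing the content counter.
theorem pvLoopB_skip : ∀ (u t : List Char) (n : Nat),
    (∀ c ∈ u, c ≠ '{' ∧ c ≠ '}') → pvLoopB (u ++ t) true n = pvLoopB t true (n + u.length) := by
  intro u
  induction u with
  | nil => intro t n _; simp
  | cons c u ih =>
    intro t n h
    obtain ⟨hc1, hc2⟩ := h c (by simp)
    simp only [List.cons_append, pvLoopB, if_neg hc1, if_neg hc2, if_true]
    rw [ih t (n + 1) (fun x hx => h x (by simp [hx]))]
    congr 1
    simp only [List.length_cons]
    omega

-- B rejects as soon as a second '{' appears before the pair is closed.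
theorem pvLoopB_nest : ∀ (u t : List Char) (n : Nat),
    '}' ∉ u → '{' ∈ u → pvLoopB (u ++ t) true n = false := by
  intro u
  induction u with
  | nil => intro t n _ h; simp at h
  | cons c u ih =>
    intro t n h1 h2
    by_cases hc : c = '{'
    · simp [pvLoopB, hc]
    · have hc2 : c ≠ '}' := fun hh => h1 (by simp [hh])
      simp only [List.cons_append, pvLoopB, if_neg hc, if_neg hc2, if_true]
      have h2' : '{' ∈ u := by
        rcases List.mem_cons.mp h2 with h | h
        · exact absurd h.symm hc
        · exact h
      exact ih t (n + 1) (fun hh => h1 (by simp [hh])) h2'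

-- With strictly more '{' than '}' remaining, A must eventually fail.
theorem pvLoopA_imbalance : ∀ (m : Nat) (l : List Char), l.length ≤ m →
    l.count '}' < l.count '{' → pvLoopA l = false := by
  intro m
  induction m with
  | zero =>
    intro l h hc
    simp only [Nat.le_zero, List.length_eq_zero_iff] at h
    subst h; simp at hc
  | succ m ih =>
    intro l hlen hc
    cases l with
    | nil => simp at hc
    | cons c t =>
      by_cases hc1 : c = '{'
      · subst hc1
        rw [pvLoopA]
        simp only [reduceIte]
        cases hfc : pvFindClose t with
        | none => simp
        | some k =>
          obtain ⟨hlu, hmu, hdec⟩ := pvFindClose_some t k hfc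
          by_cases hk : k = 0
          · simp [hk]
          · by_cases hbr : '{' ∈ t.take k
            · simp [hk, hbr]
            · simp only [if_neg hk, if_neg hbr]
              apply ih
              · simp only [List.length_drop]
                simp only [List.length_cons] at hlen
                omega
              · have hu1 : List.count '}' (t.take k) = 0 := List.count_eq_zero.mpr hmu
                have hu2 : List.count '{' (t.take k) = 0 := List.count_eq_zero.mpr hbr
                have h1 := congrArg (List.count '}') hdec
                have h2 := congrArg (List.count '{') hdec
                simp [List.count_append, hu1, hu2] at h1 h2
                simp at hc
                omega
      · rw [pvLoopA]
        simp only [if_neg hc1]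
        apply ih t (by simp at hlen; omega)
        simp [List.count_cons, hc1] at hc
        by_cases hc2 : c = '}' <;> simp [hc2] at hc ⊢ <;> omega

-- Main loop equivalence under the balanced-count guard.
theorem pv_main : ∀ (m : Nat) (l : List Char), l.length ≤ m →
    l.count '{' = l.count '}' → pvLoopA l = pvLoopB l false 0 := by
  intro m
  induction m with
  | zero =>
    intro l h _
    simp only [Nat.le_zero, List.length_eq_zero_iff] at h
    subst h; simp [pvLoopA, pvLoopB]
  | succ m ih =>
    intro l hlen hcnt
    cases l with
    | nil => simp [pvLoopA, pvLoopB]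
    | cons c t =>
      simp only [List.length_cons, Nat.succ_le_succ_iff] at hlen
      by_cases hc1 : c = '{'
      · subst hc1
        have hcnt' : t.count '{' + 1 = t.count '}' := by
          simpa [List.count_cons] using hcnt
        rw [pvLoopA]
        simp only [reduceIte]
        have hB : pvLoopB ('{' :: t) false 0 = pvLoopB t true 0 := by simp [pvLoopB]
        rw [hB]
        cases hfc : pvFindClose t with
        | none =>
          exfalso
          have h0 : t.count '}' = 0 := List.count_eq_zero.mpr (pvFindClose_none t hfc)
          omega
        | some k =>
          obtain ⟨hlu, hmu, hdec⟩ := pvFindClose_some t k hfc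
          by_cases hk : k = 0
          · subst hk
            simp only [reduceIte]
            have ht : t = '}' :: t.drop 1 := by simpa using hdec
            rw [ht]
            simp [pvLoopB]
          · by_cases hbr : '{' ∈ t.take k
            · simp only [if_neg hk, if_pos hbr]
              conv_rhs => rw [hdec]
              exact (pvLoopB_nest (t.take k) _ 0 hmu hbr).symm
            · simp only [if_neg hk, if_neg hbr]
              have hnb : ∀ x ∈ t.take k, x ≠ '{' ∧ x ≠ '}' :=
                fun x hx => ⟨fun h => hbr (h ▸ hx), fun h => hmu (h ▸ hx)⟩
              conv_rhs => rw [hdec]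
              rw [pvLoopB_skip _ _ 0 hnb, hlu]
              have hclose : pvLoopB ('}' :: t.drop (k + 1)) true (0 + k) =
                  pvLoopB (t.drop (k + 1)) false 0 := by
                simp [pvLoopB, hk]
              rw [hclose]
              apply ih
              · simp only [List.length_drop]
                omega
              · have hu1 : List.count '}' (t.take k) = 0 := List.count_eq_zero.mpr hmu
                have hu2 : List.count '{' (t.take k) = 0 := List.count_eq_zero.mpr hbr
                have h1 := congrArg (List.count '}') hdec
                have h2 := congrArg (List.count '{') hdec
                simp [List.count_append, hu1, hu2] at h1 h2
                omega
      · rw [pvLoopA]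
        simp only [if_neg hc1]
        by_cases hc2 : c = '}'
        · subst hc2
          have hcnt' : t.count '{' = t.count '}' + 1 := by
            simpa [List.count_cons] using hcnt
          rw [pvLoopA_imbalance t.length t le_rfl (by omega)]
          simp [pvLoopB]
        · have hB : pvLoopB (c :: t) false 0 = pvLoopB t false 0 := by
            simp [pvLoopB, hc1, hc2]
          rw [hB]
          apply ih t hlen
          simpa [List.count_cons, hc1, hc2] using hcnt

-- ===== VERDICT (by name: the statement is the Claim_ definition above) =====
theorem check_output_template_spec : Claim_equal_check_output_template := by
  unfold Claim_equal_check_output_template Spec_check_output_template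
  intro templ _
  unfold check_output_template check_output_template_alt
  by_cases h1 : PySem.Str.endswith templ ".{ext}" = true
  · simp only [h1, Bool.not_true, Bool.false_eq_true, if_false]
    by_cases h2 : PySem.Str.count templ "{" = PySem.Str.count templ "}"
    · rw [if_neg (fun hn => hn h2), if_neg (fun hn => hn h2)]
      have hl : templ.toList.count '{' = templ.toList.count '}' := by
        have h2' := h2
        rw [PySem.Str.count_eq, PySem.Str.count_eq] at h2'
        have ha : "{".toList = ['{'] := rfl
        have hb : "}".toList = ['}'] := rfl
        rw [ha, hb, pv_count_single, pv_count_single] at h2'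
        exact h2'
      exact pv_main templ.toList.length templ.toList le_rfl hl
    · rw [if_pos h2, if_pos h2]
  · have h1' : PySem.Str.endswith templ ".{ext}" = false := by
      revert h1; cases PySem.Str.endswith templ ".{ext}" <;> simp
    have hcond : (!PySem.Str.endswith templ ".{ext}") = true := by rw [h1']; rfl
    rw [if_pos hcond, if_pos hcond]
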